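-- pv_equiv track=rewrite | github.com/ginop-1/Aoc_2023 | 14.py | spin_cycle
-- ===== SOURCE A (Python) =====
-- def spin_cycle(lines):
--     cache = {tuple(line for line in lines): 0}
--     cycle_n = 1
--     while True:
--         # north
--         cols = ["".join([line[i] for line in lines]) for i in range(len(lines[0]))]
--         lines = [[] for _ in range(len(lines))]
--         for col in cols:
--             splitted = col.split("#")
--             splitted = [
--                 "O" * split.count("O") + "." * split.count(".") for split in splitted
--             ]
--             final = list("".join(split for split in splitted if split != ""))
--             hashtags = [i for i, c in enumerate(col) if c == "#"]
--             for hashtag in hashtags: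
--                 final.insert(hashtag, "#")
--             [lines[i].append(c) for i, c in enumerate(final)]
--         # west
--         rows = ["".join(line) for line in lines]
--         lines = [[] for _ in range(len(lines))]
--         for c, row in enumerate(rows):
--             splitted = row.split("#")
--             splitted = [
--                 "O" * split.count("O") + "." * split.count(".") for split in splitted
--             ]
--             final = list("".join(split for split in splitted if split != ""))
--             hashtags = [i for i, c in enumerate(row) if c == "#"]
--             for hashtag in hashtags:
--                 final.insert(hashtag, "#")
--             lines[c] = final
--         # south
--         cols = ["".join([line[i] for line in lines]) for i in range(len(lines[0]))]
--         lines = [[] for _ in range(len(lines))]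
--         for col in cols:
--             splitted = col.split("#")
--             splitted = [
--                 "." * split.count(".") + "O" * split.count("O") for split in splitted
--             ]
--             final = list("".join(split for split in splitted if split != ""))
--             hashtags = [i for i, c in enumerate(col) if c == "#"]
--             for hashtag in hashtags:
--                 final.insert(hashtag, "#")
--             [lines[i].append(c) for i, c in enumerate(final)]
--         # east
--         rows = ["".join(line) for line in lines]
--         lines = [[] for _ in range(len(lines))]
--         for c, row in enumerate(rows):
--             splitted = row.split("#")
--             splitted = [
--                 "." * split.count(".") + "O" * split.count("O") for split in splitted
--             ]
--             final = list("".join(split for split in splitted if split != ""))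
--             hashtags = [i for i, c in enumerate(row) if c == "#"]
--             for hashtag in hashtags:
--                 final.insert(hashtag, "#")
--             lines[c] = final
--
--         lines = tuple(tuple(line) for line in lines)
--         if lines in cache:
--             cycle = cycle_n - cache[lines]
--             idx = cache[lines] + (1000000000 - cache[lines]) % cycle
--             for k, v in cache.items():
--                 if v == idx:
--                     return k
--         else:
--             cache[lines] = cycle_n
--         lines = [list(line) for line in lines]
--         cycle_n += 1
-- ===== SOURCE B (Python) =====
-- def _roll_east(row):
--     # one pass, left to right: count rocks and gaps of the current '#'-free run,
--     # flush the run (gaps first, rocks against the east wall) at each '#'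
--     out = []
--     rocks = 0
--     gaps = 0
--     for ch in row:
--         if ch == '#':
--             out.append('.' * gaps + 'O' * rocks + '#')
--             rocks = 0
--             gaps = 0
--         elif ch == 'O':
--             rocks += 1
--         else:
--             gaps += 1
--     out.append('.' * gaps + 'O' * rocks)
--     return ''.join(out)
--
--
-- def _rotate_cw(grid):
--     cols = len(grid[0])
--     return [''.join(row[c] for row in reversed(grid)) for c in range(cols)]
--
--
-- def _spin(grid):
--     # rotate 90 degrees clockwise and roll every row east, four times:
--     # this tilts north, west, south, east and restores the orientation
--     for _ in range(4):
--         grid = [_roll_east(row) for row in _rotate_cw(grid)]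
--     return grid
--
--
-- def spin_cycle(lines):
--     grid = [''.join(line) for line in lines]
--     seen = {}
--     history = []
--     while True:
--         grid = _spin(grid)
--         key = tuple(grid)
--         if key in seen:
--             first = seen[key]
--             idx = first + (1000000000 - first) % (len(history) + 1 - first)
--             return tuple(tuple(row) for row in history[idx - 1])
--         seen[key] = len(history) + 1
--         history.append(grid)
-- ===== Notes on version B (the rewrite author's own statement) =====
-- stated objective: alternative
-- what changed: Replaces A's four duplicated tilt blocks (split-on-'#', count-and-rebuild each piece, re-insert '#'s one by one with list.insert, element-wise append write-back, dict scanned by value to recover the answer) with a uniform spin of four rotate-90-clockwise steps each followed by a single-pass run-counting roll that builds each row once, and recovers the answer grid by indexing a history list instead of scanning the cache dict.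
-- outside the precondition, e.g. on spin_cycle(['']): A returns ((),), B raises IndexError; on spin_cycle(['.x']): A returns (('.',),), B returns (('.', '.'),); on spin_cycle(['ab']): A returns ((),), B returns (('.', '.'),)
import Mathlib
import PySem

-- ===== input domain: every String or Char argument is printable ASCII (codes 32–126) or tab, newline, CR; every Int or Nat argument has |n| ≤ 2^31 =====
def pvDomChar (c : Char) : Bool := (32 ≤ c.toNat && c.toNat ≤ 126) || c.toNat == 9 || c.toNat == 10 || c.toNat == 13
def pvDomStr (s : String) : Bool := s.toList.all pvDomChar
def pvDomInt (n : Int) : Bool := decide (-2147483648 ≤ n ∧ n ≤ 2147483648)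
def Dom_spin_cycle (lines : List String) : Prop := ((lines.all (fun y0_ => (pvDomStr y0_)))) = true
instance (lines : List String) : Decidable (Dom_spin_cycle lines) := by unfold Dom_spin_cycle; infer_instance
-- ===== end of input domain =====

-- B rewrites A's four duplicated split/insert tilt blocks as a uniform rotate-and-roll
-- spin (one single-pass run-counting roll, applied after each of four clockwise
-- rotations) with history-list cycle recovery instead of a by-value dict scan.

-- ===== PORT A =====
-- 'O' * split.count('O') + '.' * split.count('.')
def aRebuildFirst (s : List Char) : List Char :=
  List.replicate (s.count 'O') 'O' ++ List.replicate (s.count '.') '.'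
-- '.' * split.count('.') + 'O' * split.count('O')
def aRebuildLast (s : List Char) : List Char :=
  List.replicate (s.count '.') '.' ++ List.replicate (s.count 'O') 'O'

-- [i for i, c in enumerate(col) if c == '#']
def aHash (col : List Char) : List Int :=
  (PySem.List.enumerate col 0).filterMap (fun p => if p.2 = '#' then some p.1 else none)

-- the duplicated per-line body of A's four tilt blocks (rebuild is the piece-rebuild
-- expression, the only thing that differs between the north/west and south/east copies)
def aRow (rebuild : List Char → List Char) (col : List Char) : List Char :=
  let splitted := PySem.Chars.splitOn col ['#']
  let splitted := splitted.map rebuild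
  let final := (splitted.filter (fun s => !s.isEmpty)).flatten
  (aHash col).foldl (fun f h => PySem.List.insert f h '#') final

-- cols = [''.join([line[i] for line in lines]) for i in range(len(lines[0]))]
-- lines[0] on empty input and line[i] on a short line raise IndexError in Python:
-- those inputs are excluded by Pre_; headD/getD defaults are never reached inside Pre_.
def aCols (lines : List (List Char)) : List (List Char) :=
  (List.range (lines.headD []).length).map (fun i => lines.map (fun l => l.getD i ' '))

-- [lines[i].append(c) for i, c in enumerate(final)]  (index i is nonnegative, from enumerate)
def aAppendCol (acc : List (List Char)) (f : List Char) : List (List Char) :=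
  (PySem.List.enumerate f 0).foldl (fun a p => a.modify p.1.toNat (fun r => r ++ [p.2])) acc

-- the north / south blocks: per column, then write back element-wise
def aTiltV (rebuild : List Char → List Char) (lines : List (List Char)) : List (List Char) :=
  (aCols lines).foldl (fun acc col => aAppendCol acc (aRow rebuild col))
    (List.replicate lines.length [])

-- the west / east blocks: per row, lines[c] = final
def aTiltH (rebuild : List Char → List Char) (lines : List (List Char)) : List (List Char) :=
  lines.map (aRow rebuild)

-- the while-True loop.  fuel only makes the recursion total (Python's loop runs until a
-- state repeats); the cache key type (Bool × grid) models Python's key types exactly: the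
-- initial key is a tuple of STRINGS (true, …), later keys tuples of tuples (false, …),
-- and in Python a tuple of strings never equals a tuple of tuples of chars.
def aLoop : Nat → List (List Char) → PySem.Dict (Bool × List (List Char)) Int → Int → List (List String)
  | 0, _, _, _ => []
  | fuel+1, lines0, cache, cycle_n =>
    let l1 := aTiltV aRebuildFirst lines0   -- north
    let l2 := aTiltH aRebuildFirst l1       -- west
    let l3 := aTiltV aRebuildLast l2        -- south
    let l4 := aTiltH aRebuildLast l3        -- east
    match cache.get? (false, l4) with
    | some first =>
        let cycle := cycle_n - first
        let idx := first + PySem.Int.mod (1000000000 - first) cycle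
        match cache.items.find? (fun kv => kv.2 == idx) with
        | some ((_, k), _) => k.map (fun row => row.map (fun ch => String.ofList [ch]))
        | none => []   -- unreachable: every value 0..cycle_n-1 is in the cache and first ≤ idx < cycle_n
    | none => aLoop fuel l4 (cache.insert (false, l4) cycle_n) (cycle_n + 1)

-- totality fuel for both loops: the states are grids over {'O','.','#'} of the input's
-- shape, so a repeat occurs within 3^(R*C)+1 iterations on every input Pre_ admits
def pvFuel (lines : List String) : Nat := 3 ^ (lines.length * (lines.headD "").length) + 2

def spin_cycle (lines : List String) : List (List String) :=
  aLoop (pvFuel lines) (lines.map String.toList)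
    (PySem.Dict.empty.insert (true, lines.map String.toList) 0) 1

-- ===== PORT B =====
-- one pass, counting rocks and gaps of the current '#'-free run, flushing at each '#'
def bRoll (row : List Char) : List Char :=
  let st := row.foldl (fun (acc : List (List Char) × Nat × Nat) ch =>
      if ch = '#' then
        (acc.1 ++ [List.replicate acc.2.2 '.' ++ List.replicate acc.2.1 'O' ++ ['#']], 0, 0)
      else if ch = 'O' then (acc.1, acc.2.1 + 1, acc.2.2)
      else (acc.1, acc.2.1, acc.2.2 + 1))
    ([], 0, 0)
  (st.1 ++ [List.replicate st.2.2 '.' ++ List.replicate st.2.1 'O']).flatten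

-- [''.join(col) for col in zip(*grid[::-1])]; zip truncates to the shortest row — on the
-- rectangular grids Pre_ admits that is the length of the first row; getD never defaults.
def bRotate (g : List (List Char)) : List (List Char) :=
  (List.range (g.headD []).length).map (fun i => g.reverse.map (fun l => l.getD i ' '))

-- rotate clockwise and roll east, four times
def bSpin (g : List (List Char)) : List (List Char) :=
  (List.range 4).foldl (fun g2 _ => (bRotate g2).map bRoll) g

-- fuel only makes the recursion total, as in aLoop
def bLoop : Nat → List (List Char) → PySem.Dict (List (List Char)) Int → List (List (List Char)) → List (List String)
  | 0, _, _, _ => []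
  | fuel+1, grid, seen, history =>
    let g := bSpin grid
    match seen.get? g with
    | some first =>
        let idx := first + PySem.Int.mod (1000000000 - first) ((history.length : Int) + 1 - first)
        match PySem.List.pyGet? history (idx - 1) with
        | some h => h.map (fun row => row.map (fun ch => String.ofList [ch]))
        | none => []   -- unreachable: 1 ≤ idx ≤ len(history)
    | none => bLoop fuel g (seen.insert g ((history.length : Int) + 1)) (history ++ [g])

def spin_cycle_alt (lines : List String) : List (List String) :=
  bLoop (pvFuel lines) (lines.map String.toList) PySem.Dict.empty []

-- ===== PRECONDITION & SPEC =====
-- Pre_ excludes the inputs where Python A raises (empty input, ragged grids) and the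
-- degenerate/foreign-alphabet grids (empty first row, characters outside 'O','.','#')
-- on which A's char-dropping rebuild returns accidental shrunken grids.
-- the grid width is the first row's length; Python A reads exactly the first C characters
-- of every row (later rows may be longer, with arbitrary tails that are never read)
def Pre_spin_cycle (lines : List String) : Prop :=
  (!lines.isEmpty && !(lines.headD "").toList.isEmpty
    && lines.all (fun l => (lines.headD "").toList.length ≤ l.toList.length
        && (l.toList.take (lines.headD "").toList.length).all
            (fun c => c == 'O' || c == '.' || c == '#'))) = true
instance (lines : List String) : Decidable (Pre_spin_cycle lines) := by
  unfold Pre_spin_cycle; infer_instance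
def pvWitness_spin_cycle : List String := ["O.", "#."]
def Spec_spin_cycle (lines : List String) (out : List (List String)) : Prop :=
  out = spin_cycle_alt lines
instance (lines : List String) (out : List (List String)) : Decidable (Spec_spin_cycle lines out) := by
  unfold Spec_spin_cycle; infer_instance

-- ===== CLAIM =====
def Claim_equal_spin_cycle : Prop :=
  ∀ (lines : List String), Dom_spin_cycle lines → Pre_spin_cycle lines →
    Spec_spin_cycle lines (spin_cycle lines)

-- ===== LEMMAS AND PROOFS =====

def mySplit : List Char → List (List Char)
  | [] => [[]]
  | c :: t => if c = '#' then [] :: mySplit t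
      else match mySplit t with
        | p :: ps => (c :: p) :: ps
        | [] => [[c]]

theorem mySplit_ne_nil (l : List Char) : mySplit l ≠ [] := by
  match l with
  | [] => simp [mySplit]
  | c :: t =>
    simp only [mySplit]
    split
    · simp
    · split <;> simp

def prepFirst (x : List Char) : List (List Char) → List (List Char)
  | p :: t => (x ++ p) :: t
  | [] => [x]

theorem go_eq (l : List Char) : ∀ (fuel : Nat) (cur : List Char) (acc : List (List Char)),
    l.length < fuel →
    PySem.Chars.splitOn.go ['#'] fuel l cur acc = acc.reverse ++ prepFirst cur.reverse (mySplit l) := by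
  induction l with
  | nil =>
    intro fuel cur acc h
    match fuel with
    | f + 1 => simp [PySem.Chars.splitOn.go, mySplit, prepFirst]
  | cons c t ih =>
    intro fuel cur acc h
    match fuel with
    | f + 1 =>
      simp only [PySem.Chars.splitOn.go]
      by_cases hc : c = '#'
      · subst hc
        rw [if_pos (by simp [List.isPrefixOf])]
        simp only [List.length_cons, List.length_nil, List.drop_succ_cons, List.drop_zero]
        rw [ih f [] (cur.reverse :: acc) (by simpa using h)]
        simp only [mySplit, if_pos rfl, List.reverse_cons, List.append_assoc, List.reverse_nil]
        rcases hsp : mySplit t with _ | ⟨p, ps⟩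
        · exact absurd hsp (mySplit_ne_nil t)
        · simp [prepFirst]
      · rw [if_neg (by simp [List.isPrefixOf]; exact fun h => hc h.symm)]
        rw [ih f (c :: cur) acc (by simpa using h)]
        simp only [mySplit, if_neg hc]
        congr 1
        rcases hsp : mySplit t with _ | ⟨p, ps⟩
        · exact absurd hsp (mySplit_ne_nil t)
        · simp [prepFirst]

theorem splitOn_eq_mySplit (l : List Char) : PySem.Chars.splitOn l ['#'] = mySplit l := by
  show PySem.Chars.splitOn.go _ _ _ _ _ = _
  rw [go_eq l (l.length + 1) [] [] (by omega)]
  rcases hsp : mySplit l with _ | ⟨p, ps⟩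
  · exact absurd hsp (mySplit_ne_nil l)
  · simp [prepFirst]

theorem mySplit_no_hash {l : List Char} (h : '#' ∉ l) : mySplit l = [l] := by
  induction l with
  | nil => simp [mySplit]
  | cons c t ih =>
    simp only [List.mem_cons, not_or] at h
    simp only [mySplit, if_neg (Ne.symm h.1), ih h.2]

theorem mySplit_append_hash {seg rest : List Char} (h : '#' ∉ seg) :
    mySplit (seg ++ '#' :: rest) = seg :: mySplit rest := by
  induction seg with
  | nil => simp [mySplit]
  | cons c t ih =>
    simp only [List.mem_cons, not_or] at h
    simp only [List.cons_append, mySplit, if_neg (Ne.symm h.1), ih h.2]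

theorem mySplit_hash_last {u v : List Char} (h : '#' ∉ v) :
    mySplit (u ++ '#' :: v) = mySplit u ++ [v] := by
  induction u with
  | nil => simp [mySplit, mySplit_no_hash h]
  | cons c t ih =>
    by_cases hc : c = '#'
    · subst hc; simp [mySplit, ih]
    · simp only [List.cons_append, mySplit, if_neg hc, ih]
      rcases hsp : mySplit t with _ | ⟨p, ps⟩
      · exact absurd hsp (mySplit_ne_nil t)
      · simp

def joinHash : List (List Char) → List Char
  | [] => []
  | [p] => p
  | p :: ps => p ++ '#' :: joinHash ps

theorem joinHash_cons {p : List Char} {ps : List (List Char)} (h : ps ≠ []) :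
    joinHash (p :: ps) = p ++ '#' :: joinHash ps := by
  rcases ps with _ | ⟨q, qs⟩
  · exact absurd rfl h
  · rfl

theorem joinHash_append_singleton {ps : List (List Char)} (h : ps ≠ []) (v : List Char) :
    joinHash (ps ++ [v]) = joinHash ps ++ '#' :: v := by
  induction ps with
  | nil => exact absurd rfl h
  | cons p t ih =>
    rcases ht : t with _ | ⟨q, qs⟩
    · simp [joinHash]
    · rw [← ht, List.cons_append, joinHash_cons (by simp [ht]), joinHash_cons (by simp [ht]),
        ih (by simp [ht])]
      simp

def canonWith (rb : List Char → List Char) (l : List Char) : List Char :=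
  joinHash ((mySplit l).map rb)

theorem canonWith_no_hash {l : List Char} (h : '#' ∉ l) (rb : List Char → List Char) :
    canonWith rb l = rb l := by
  simp [canonWith, mySplit_no_hash h, joinHash]

theorem canonWith_cons {seg rest : List Char} (h : '#' ∉ seg) (rb : List Char → List Char) :
    canonWith rb (seg ++ '#' :: rest) = rb seg ++ '#' :: canonWith rb rest := by
  rw [canonWith, mySplit_append_hash h, List.map_cons,
    joinHash_cons (by simpa using mySplit_ne_nil rest)]
  rfl

theorem canonWith_last {u v : List Char} (h : '#' ∉ v) (rb : List Char → List Char) :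
    canonWith rb (u ++ '#' :: v) = canonWith rb u ++ '#' :: rb v := by
  rw [canonWith, mySplit_hash_last h, List.map_append, List.map_singleton,
    joinHash_append_singleton (by simpa using mySplit_ne_nil u)]
  rfl

def GoodRow (l : List Char) : Prop := ∀ c ∈ l, c = 'O' ∨ c = '.' ∨ c = '#'

theorem goodRow_append_left {a b : List Char} (h : GoodRow (a ++ b)) : GoodRow a :=
  fun c hc => h c (List.mem_append_left _ hc)
theorem goodRow_append_right {a b : List Char} (h : GoodRow (a ++ b)) : GoodRow b :=
  fun c hc => h c (List.mem_append_right _ hc)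
theorem goodRow_tail {a : Char} {b : List Char} (h : GoodRow (a :: b)) : GoodRow b :=
  fun c hc => h c (List.mem_cons_of_mem _ hc)

-- first-'#' decomposition
theorem firstHash {l : List Char} (h : '#' ∈ l) :
    ∃ seg rest, l = seg ++ '#' :: rest ∧ '#' ∉ seg := by
  induction l with
  | nil => cases h
  | cons c t ih =>
    by_cases hc : c = '#'
    · exact ⟨[], t, by simp [hc], by simp⟩
    · rcases ih (by rcases List.mem_cons.1 h with h' | h' <;> first | exact absurd h'.symm hc | exact h') with
        ⟨seg, rest, hEq, hNo⟩
      exact ⟨c :: seg, rest, by simp [hEq], by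
        simp only [List.mem_cons, not_or]
        exact ⟨Ne.symm hc, hNo⟩⟩

-- induction principle along '#'-runs
theorem hashInd {P : List Char → Prop}
    (h0 : ∀ l, '#' ∉ l → P l)
    (h1 : ∀ seg rest, '#' ∉ seg → P rest → P (seg ++ '#' :: rest)) : ∀ l, P l := by
  intro l
  induction hn : l.length using Nat.strong_induction_on generalizing l with
  | _ n ih =>
    by_cases h : '#' ∈ l
    · rcases firstHash h with ⟨seg, rest, hEq, hNo⟩
      subst hEq
      exact h1 seg rest hNo (ih rest.length (by simp [← hn]; omega) rest rfl)
    · exact h0 l h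

theorem count_len {s : List Char} (hg : ∀ c ∈ s, c = 'O' ∨ c = '.') :
    s.count 'O' + s.count '.' = s.length := by
  induction s with
  | nil => simp
  | cons c t ih =>
    have hc := hg c (by simp)
    have ht := ih (fun c hc => hg c (List.mem_cons_of_mem _ hc))
    rcases hc with hc | hc <;> subst hc <;> simp [List.count_cons, ← ht] <;> omega

theorem good_no_hash {s : List Char} (hg : GoodRow s) (hh : '#' ∉ s) :
    ∀ c ∈ s, c = 'O' ∨ c = '.' := by
  intro c hc
  rcases hg c hc with h | h | h
  · exact Or.inl h
  · exact Or.inr h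
  · exact absurd (h ▸ hc) hh

theorem rebuild_len_first {s : List Char} (hg : GoodRow s) (hh : '#' ∉ s) :
    (aRebuildFirst s).length = s.length := by
  simp [aRebuildFirst, count_len (good_no_hash hg hh)]
theorem rebuild_len_last {s : List Char} (hg : GoodRow s) (hh : '#' ∉ s) :
    (aRebuildLast s).length = s.length := by
  simp [aRebuildLast]; rw [Nat.add_comm]; exact count_len (good_no_hash hg hh)

theorem rebuild_good_first (s : List Char) : GoodRow (aRebuildFirst s) := by
  intro c hc
  rcases List.mem_append.1 hc with h | h <;> rw [List.eq_of_mem_replicate h] <;> simp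
theorem rebuild_good_last (s : List Char) : GoodRow (aRebuildLast s) := by
  intro c hc
  rcases List.mem_append.1 hc with h | h <;> rw [List.eq_of_mem_replicate h] <;> simp

theorem canon_len {rb : List Char → List Char}
    (hrb : ∀ s, GoodRow s → '#' ∉ s → (rb s).length = s.length) :
    ∀ {l : List Char}, GoodRow l → (canonWith rb l).length = l.length := by
  have : ∀ l, GoodRow l → (canonWith rb l).length = l.length := by
    apply hashInd
    · intro l h hg; rw [canonWith_no_hash h, hrb l hg h]
    · intro seg rest hNo ih hg
      rw [canonWith_cons hNo]
      have h1 := hrb seg (goodRow_append_left hg) hNo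
      have h2 := ih (goodRow_tail (goodRow_append_right hg))
      simp [h1, h2]
  exact fun {l} => this l

theorem canon_good {rb : List Char → List Char}
    (hrb : ∀ s, GoodRow s → '#' ∉ s → GoodRow (rb s)) :
    ∀ {l : List Char}, GoodRow l → GoodRow (canonWith rb l) := by
  have : ∀ l, GoodRow l → GoodRow (canonWith rb l) := by
    apply hashInd
    · intro l h hg; rw [canonWith_no_hash h]; exact hrb l hg h
    · intro seg rest hNo ih hg
      rw [canonWith_cons hNo]
      intro c hc
      rcases List.mem_append.1 hc with h | h
      · exact hrb seg (goodRow_append_left hg) hNo c h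
      · rcases List.mem_cons.1 h with h | h
        · exact Or.inr (Or.inr h)
        · exact ih (goodRow_tail (goodRow_append_right hg)) c h
  exact fun {l} => this l

def hashPos : List Char → Int → List Int
  | [], _ => []
  | c :: t, s => if c = '#' then s :: hashPos t (s + 1) else hashPos t (s + 1)

theorem hashPos_no_hash {l : List Char} (h : '#' ∉ l) : ∀ s : Int, hashPos l s = [] := by
  induction l with
  | nil => intro s; rfl
  | cons c t ih =>
    intro s
    simp only [List.mem_cons, not_or] at h
    simp [hashPos, if_neg (Ne.symm h.1), ih h.2]

theorem hashPos_append_free {seg : List Char} (h : '#' ∉ seg) (t : List Char) :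
    ∀ s : Int, hashPos (seg ++ t) s = hashPos t (s + seg.length) := by
  induction seg with
  | nil => intro s; simp
  | cons c sg ih =>
    intro s
    simp only [List.mem_cons, not_or] at h
    simp only [List.cons_append, hashPos, if_neg (Ne.symm h.1), ih h.2]
    congr 1
    simp only [List.length_cons]
    push_cast
    omega

theorem enum_filterMap_eq_hashPos (l : List Char) : ∀ s : Int,
    (PySem.List.enumerate l s).filterMap (fun p => if p.2 = '#' then some p.1 else none)
      = hashPos l s := by
  induction l with
  | nil => intro s; rfl
  | cons c t ih =>
    intro s
    rw [PySem.List.enumerate_cons, List.filterMap_cons, ih (s + 1)]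
    by_cases hc : c = '#' <;> simp [hashPos, hc]

theorem aHash_eq_hashPos (l : List Char) : aHash l = hashPos l 0 :=
  enum_filterMap_eq_hashPos l 0

def flatFil (rb : List Char → List Char) (l : List Char) : List Char :=
  (((mySplit l).map rb).filter (fun s => !s.isEmpty)).flatten

theorem flatFil_no_hash {l : List Char} (h : '#' ∉ l) (rb : List Char → List Char) :
    flatFil rb l = rb l := by
  rw [flatFil, mySplit_no_hash h]
  rcases hr : rb l with _ | ⟨c, t⟩ <;> simp [List.filter, hr]

theorem flatFil_cons {seg rest : List Char} (h : '#' ∉ seg) (rb : List Char → List Char) :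
    flatFil rb (seg ++ '#' :: rest) = rb seg ++ flatFil rb rest := by
  rw [flatFil, mySplit_append_hash h, List.map_cons]
  rcases hr : rb seg with _ | ⟨c, t⟩ <;> simp [List.filter, hr, flatFil]

theorem key_fold {rb : List Char → List Char}
    (hrb : ∀ s, GoodRow s → '#' ∉ s → (rb s).length = s.length) :
    ∀ l, GoodRow l → ∀ pfx : List Char,
      (hashPos l pfx.length).foldl (fun f h => PySem.List.insert f h '#') (pfx ++ flatFil rb l)
        = pfx ++ canonWith rb l := by
  apply hashInd (P := fun l => GoodRow l → ∀ pfx : List Char,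
    (hashPos l pfx.length).foldl (fun f h => PySem.List.insert f h '#') (pfx ++ flatFil rb l)
      = pfx ++ canonWith rb l)
  · intro l h hg pfx
    rw [hashPos_no_hash h, flatFil_no_hash h, canonWith_no_hash h]
    rfl
  · intro seg rest hNo ih hg pfx
    have hgseg : GoodRow seg := goodRow_append_left hg
    have hgrest : GoodRow rest := goodRow_tail (goodRow_append_right hg)
    rw [hashPos_append_free hNo, flatFil_cons hNo, canonWith_cons hNo]
    show ((if '#' = '#' then _ else _ : List Int).foldl _ _) = _
    rw [if_pos rfl, List.foldl_cons]
    have hlen : (rb seg).length = seg.length := hrb seg hgseg hNo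
    have e1 : PySem.List.insert (pfx ++ (rb seg ++ flatFil rb rest)) (↑pfx.length + ↑seg.length) '#'
        = (pfx ++ rb seg ++ ['#']) ++ flatFil rb rest := by
      have hcast : (↑pfx.length + ↑seg.length : Int) = ((pfx ++ rb seg).length : Nat) := by
        simp [hlen]
      rw [hcast, ← List.append_assoc,
        PySem.List.insert_natCast _ _ _ (by simp),
        List.take_left' rfl, List.drop_left' rfl]
      simp
    rw [e1]
    have e2 : (↑pfx.length + ↑seg.length + 1 : Int) = ((pfx ++ rb seg ++ ['#']).length : Nat) := by
      simp [hlen]; omega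
    rw [e2, ih hgrest (pfx ++ rb seg ++ ['#'])]
    simp

theorem aRow_eq_canon {rb : List Char → List Char}
    (hrb : ∀ s, GoodRow s → '#' ∉ s → (rb s).length = s.length)
    {l : List Char} (hg : GoodRow l) : aRow rb l = canonWith rb l := by
  have h0 : ((([] : List Char)).length : Int) = 0 := by simp
  have := key_fold hrb l hg []
  rw [h0] at this
  simpa [aRow, aHash_eq_hashPos, splitOn_eq_mySplit, flatFil] using this

def bStep (acc : List (List Char) × Nat × Nat) (ch : Char) : List (List Char) × Nat × Nat :=
  if ch = '#' then
    (acc.1 ++ [List.replicate acc.2.2 '.' ++ List.replicate acc.2.1 'O' ++ ['#']], 0, 0)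
  else if ch = 'O' then (acc.1, acc.2.1 + 1, acc.2.2)
  else (acc.1, acc.2.1, acc.2.2 + 1)

theorem bRoll_eq_fold (row : List Char) :
    bRoll row = ((row.foldl bStep ([], 0, 0)).1
      ++ [List.replicate (row.foldl bStep ([], 0, 0)).2.2 '.'
          ++ List.replicate (row.foldl bStep ([], 0, 0)).2.1 'O']).flatten := rfl

theorem bSeg {seg : List Char} (hh : '#' ∉ seg) (hg : ∀ c ∈ seg, c = 'O' ∨ c = '.') :
    ∀ out r g, seg.foldl bStep (out, r, g) = (out, r + seg.count 'O', g + seg.count '.') := by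
  induction seg with
  | nil => intro out r g; simp
  | cons c t ih =>
    intro out r g
    simp only [List.mem_cons, not_or] at hh
    have hgt : ∀ c ∈ t, c = 'O' ∨ c = '.' := fun c hc => hg c (List.mem_cons_of_mem _ hc)
    rcases hg c (by simp) with hc | hc <;> subst hc <;>
      simp [bStep, List.foldl_cons, ih hh.2 hgt, List.count_cons] <;> omega

theorem bOut (l : List Char) : ∀ (out0 o : List (List Char)) (r g : Nat),
    l.foldl bStep (out0 ++ o, r, g)
      = (out0 ++ (l.foldl bStep (o, r, g)).1, (l.foldl bStep (o, r, g)).2) := by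
  induction l with
  | nil => intro out0 o r g; simp
  | cons c t ih =>
    intro out0 o r g
    simp only [List.foldl_cons]
    by_cases h1 : c = '#'
    · subst h1
      rw [show bStep (out0 ++ o, r, g) '#'
            = (out0 ++ (o ++ [List.replicate g '.' ++ List.replicate r 'O' ++ ['#']]), 0, 0) by
          simp [bStep]]
      rw [show bStep (o, r, g) '#'
            = (o ++ [List.replicate g '.' ++ List.replicate r 'O' ++ ['#']], 0, 0) by
          simp [bStep]]
      exact ih out0 _ 0 0
    · by_cases h2 : c = 'O'
      · subst h2
        rw [show bStep (out0 ++ o, r, g) 'O' = (out0 ++ o, r + 1, g) by simp [bStep]]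
        rw [show bStep (o, r, g) 'O' = (o, r + 1, g) by simp [bStep]]
        exact ih out0 o (r + 1) g
      · rw [show bStep (out0 ++ o, r, g) c = (out0 ++ o, r, g + 1) by simp [bStep, h1, h2]]
        rw [show bStep (o, r, g) c = (o, r, g + 1) by simp [bStep, h1, h2]]
        exact ih out0 o r (g + 1)

theorem bRoll_eq_canon : ∀ {l : List Char}, GoodRow l → bRoll l = canonWith aRebuildLast l := by
  have main : ∀ l, GoodRow l → bRoll l = canonWith aRebuildLast l := by
    apply hashInd
    · intro l hh hg
      rw [bRoll_eq_fold, bSeg hh (good_no_hash hg hh), canonWith_no_hash hh]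
      simp [aRebuildLast]
    · intro seg rest hNo ih hg
      have hgseg := goodRow_append_left hg
      have hgrest := goodRow_tail (goodRow_append_right hg)
      have e : (seg ++ '#' :: rest).foldl bStep ([], 0, 0)
          = ((aRebuildLast seg ++ ['#']) :: (rest.foldl bStep ([], 0, 0)).1,
             (rest.foldl bStep ([], 0, 0)).2) := by
        rw [List.foldl_append, bSeg hNo (good_no_hash hgseg hNo), List.foldl_cons]
        simp only [Nat.zero_add]
        rw [show bStep ([], seg.count 'O', seg.count '.') '#'
              = ([aRebuildLast seg ++ ['#']], 0, 0) by simp [bStep, aRebuildLast]]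
        have := bOut rest [aRebuildLast seg ++ ['#']] [] 0 0
        simpa using this
      rw [bRoll_eq_fold, e, canonWith_cons hNo]
      simp only [List.cons_append, List.flatten_cons]
      rw [← bRoll_eq_fold rest, ih hgrest]
      simp
  exact fun {l} => main l

theorem rebuildLast_reverse (s : List Char) :
    aRebuildLast s.reverse = (aRebuildFirst s).reverse := by
  simp [aRebuildLast, aRebuildFirst, List.count_reverse, List.reverse_append]

theorem canon_reverse : ∀ {l : List Char}, GoodRow l →
    canonWith aRebuildLast l.reverse = (canonWith aRebuildFirst l).reverse := by
  have main : ∀ l, GoodRow l →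
      canonWith aRebuildLast l.reverse = (canonWith aRebuildFirst l).reverse := by
    apply hashInd
    · intro l hh hg
      rw [canonWith_no_hash (by simpa using hh), canonWith_no_hash hh, rebuildLast_reverse]
    · intro seg rest hNo ih hg
      have hgrest := goodRow_tail (goodRow_append_right hg)
      rw [List.reverse_append, List.reverse_cons, List.append_assoc, List.singleton_append]
      rw [canonWith_last (v := seg.reverse) (by simpa using hNo), canonWith_cons hNo,
        ih hgrest, rebuildLast_reverse]
      simp
  exact fun {l} => main l

def GoodGrid (R C : Nat) (g : List (List Char)) : Prop :=
  g.length = R ∧ ∀ r ∈ g, r.length = C ∧ GoodRow r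

def idxT (n : Nat) (g : List (List Char)) : List (List Char) :=
  (List.range n).map (fun i => g.map (fun l => l.getD i ' '))

theorem idxT_shape {R C : Nat} {g : List (List Char)} (h : GoodGrid R C g) :
    GoodGrid C R (idxT C g) := by
  refine ⟨by simp [idxT], ?_⟩
  intro r hr
  simp only [idxT, List.mem_map, List.mem_range] at hr
  obtain ⟨i, hiC, rfl⟩ := hr
  refine ⟨by simp [h.1], ?_⟩
  intro c hc
  simp only [List.mem_map] at hc
  obtain ⟨l, hl, rfl⟩ := hc
  rw [List.getD_eq_getElem _ _ (by rw [(h.2 l hl).1]; exact hiC)]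
  exact (h.2 l hl).2 _ (List.getElem_mem _)

theorem idxT_reverse (n : Nat) (g : List (List Char)) :
    idxT n g.reverse = (idxT n g).map List.reverse := by
  simp only [idxT, List.map_map]
  apply List.map_congr_left
  intro i _
  exact List.map_reverse

theorem idxT_map_reverse {n : Nat} {g : List (List Char)} (hrow : ∀ r ∈ g, r.length = n) :
    idxT n (g.map List.reverse) = (idxT n g).reverse := by
  apply List.ext_getElem
  · simp [idxT]
  · intro i h1 h2
    simp only [idxT, List.getElem_map, List.getElem_range, List.map_map,
      List.getElem_reverse, List.length_map, List.length_range]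
    apply List.map_congr_left
    intro l hl
    have hn : l.length = n := hrow l hl
    have hin : i < n := by simpa [idxT] using h1
    simp only [Function.comp_apply]
    rw [List.getD_eq_getElem _ _ (by simp [hn]; omega)]
    rw [List.getElem_reverse]
    have hlt : l.length - 1 - i = n - 1 - i := by simp [hn]
    simp only [hlt]
    rw [List.getD_eq_getElem _ _ (by simp [hn]; omega)]

theorem enumMod (f : List Char) : ∀ (s : Nat) (acc : List (List Char)) (j : Nat),
    ((PySem.List.enumerate f (s : Int)).foldl
        (fun a p => a.modify p.1.toNat (fun r => r ++ [p.2])) acc)[j]?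
      = if s ≤ j ∧ j < s + f.length then acc[j]?.map (· ++ [f.getD (j - s) ' '])
        else acc[j]? := by
  induction f with
  | nil =>
    intro s acc j
    rw [if_neg (by simp)]
    rfl
  | cons c t ih =>
    intro s acc j
    rw [PySem.List.enumerate_cons, List.foldl_cons]
    have hcast : ((s : Int) + 1) = ((s + 1 : Nat) : Int) := by push_cast; ring
    rw [hcast, ih (s + 1)]
    have hmod : (acc.modify (s : Int).toNat (fun r => r ++ [c]))[j]?
        = if s = j then acc[j]?.map (· ++ [c]) else acc[j]? := by
      rw [Int.toNat_natCast, List.getElem?_modify]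
      by_cases hj : s = j
      · simp [hj]
      · simp only [if_neg hj]
        cases acc[j]? <;> simp [hj]
    by_cases h1 : s = j
    · rw [if_neg (by omega), hmod, if_pos h1, if_pos (by simp; omega)]
      subst h1
      simp
    · by_cases h2 : s + 1 ≤ j ∧ j < s + 1 + t.length
      · rw [if_pos h2, hmod, if_neg h1, if_pos (by simp; omega)]
        have : j - s = (j - (s + 1)) + 1 := by omega
        rw [this, List.getD_cons_succ]
      · rw [if_neg h2, hmod, if_neg h1, if_neg (by simp; omega)]

theorem idxT_nil (R : Nat) : idxT R [] = List.replicate R [] := by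
  simp [idxT, List.map_const']

theorem aAppendCol_eq {R : Nat} {f : List Char} (hf : f.length = R)
    (done : List (List Char)) :
    aAppendCol (idxT R done) f = idxT R (done ++ [f]) := by
  apply List.ext_getElem?
  intro j
  have h0 : (0 : Int) = ((0 : Nat) : Int) := by norm_num
  rw [aAppendCol, h0, enumMod f 0 (idxT R done) j]
  by_cases hj : j < R
  · rw [if_pos (by omega)]
    simp only [idxT, List.getElem?_map, List.getElem?_range, hj, if_pos]
    simp [List.getD_eq_getElem _ _ (by omega : j < f.length)]
  · rw [if_neg (by omega)]
    simp [idxT, hj]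

theorem wbFold {R : Nat} : ∀ (finals done : List (List Char)),
    (∀ f ∈ finals, f.length = R) →
    finals.foldl aAppendCol (idxT R done) = idxT R (done ++ finals) := by
  intro finals
  induction finals with
  | nil => intro done _; simp
  | cons f t ih =>
    intro done hlen
    rw [List.foldl_cons, aAppendCol_eq (hlen f (by simp)) done,
      ih (done ++ [f]) (fun x hx => hlen x (List.mem_cons_of_mem _ hx))]
    simp

theorem head_len {R C : Nat} {g : List (List Char)} (h : GoodGrid R C g) (hR : 0 < R) :
    (g.headD []).length = C := by
  rcases g with _ | ⟨r, t⟩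
  · exact absurd h.1 (by simp; omega)
  · exact (h.2 r (by simp)).1

theorem aCols_eq_idxT {R C : Nat} {g : List (List Char)} (h : GoodGrid R C g) (hR : 0 < R) :
    aCols g = idxT C g := by
  rw [aCols, head_len h hR]; rfl

theorem aTiltV_eq {R C : Nat} {g : List (List Char)} (h : GoodGrid R C g) (hR : 0 < R)
    (rb : List Char → List Char)
    (hlen : ∀ col ∈ idxT C g, (aRow rb col).length = R) :
    aTiltV rb g = idxT R ((idxT C g).map (aRow rb)) := by
  rw [aTiltV, aCols_eq_idxT h hR, h.1, ← idxT_nil R, ← List.foldl_map,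
    wbFold ((idxT C g).map (aRow rb)) [] (by
      intro f hf
      obtain ⟨col, hcol, rfl⟩ := List.mem_map.1 hf
      exact hlen col hcol)]
  simp

theorem canonF_len {r : List Char} (hg : GoodRow r) :
    (canonWith aRebuildFirst r).length = r.length :=
  canon_len (fun s hs hh => rebuild_len_first hs hh) hg
theorem canonL_len {r : List Char} (hg : GoodRow r) :
    (canonWith aRebuildLast r).length = r.length :=
  canon_len (fun s hs hh => rebuild_len_last hs hh) hg
theorem canonF_good {r : List Char} (hg : GoodRow r) : GoodRow (canonWith aRebuildFirst r) :=
  canon_good (fun s _ _ => rebuild_good_first s) hg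
theorem canonL_good {r : List Char} (hg : GoodRow r) : GoodRow (canonWith aRebuildLast r) :=
  canon_good (fun s _ _ => rebuild_good_last s) hg

theorem gg_reverse {R C : Nat} {g : List (List Char)} (h : GoodGrid R C g) :
    GoodGrid R C g.reverse :=
  ⟨by simp [h.1], fun r hr => h.2 r (List.mem_reverse.1 hr)⟩

theorem gg_rho {R C : Nat} {g : List (List Char)} (h : GoodGrid R C g) :
    GoodGrid R C (g.map List.reverse) := by
  refine ⟨by simp [h.1], ?_⟩
  intro r hr
  obtain ⟨l, hl, rfl⟩ := List.mem_map.1 hr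
  exact ⟨by simp [(h.2 l hl).1], fun c hc => (h.2 l hl).2 c (List.mem_reverse.1 hc)⟩

theorem gg_mF {R C : Nat} {g : List (List Char)} (h : GoodGrid R C g) :
    GoodGrid R C (g.map (canonWith aRebuildFirst)) := by
  refine ⟨by simp [h.1], ?_⟩
  intro r hr
  obtain ⟨l, hl, rfl⟩ := List.mem_map.1 hr
  exact ⟨by rw [canonF_len (h.2 l hl).2]; exact (h.2 l hl).1, canonF_good (h.2 l hl).2⟩

theorem gg_mL {R C : Nat} {g : List (List Char)} (h : GoodGrid R C g) :
    GoodGrid R C (g.map (canonWith aRebuildLast)) := by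
  refine ⟨by simp [h.1], ?_⟩
  intro r hr
  obtain ⟨l, hl, rfl⟩ := List.mem_map.1 hr
  exact ⟨by rw [canonL_len (h.2 l hl).2]; exact (h.2 l hl).1, canonL_good (h.2 l hl).2⟩

theorem bRotate_eq {R C : Nat} {g : List (List Char)} (h : GoodGrid R C g) (hR : 0 < R) :
    bRotate g = idxT C g.reverse := by
  rw [bRotate, head_len h hR]; rfl

theorem bSpin_eq4 (g : List (List Char)) :
    bSpin g = (bRotate ((bRotate ((bRotate ((bRotate g).map bRoll)).map bRoll)).map bRoll)).map bRoll := by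
  rw [bSpin, show List.range 4 = [0, 1, 2, 3] from rfl]
  rfl

-- map bRoll over good rows is the canonical east roll
theorem map_bRoll_eq {g : List (List Char)} (hg : ∀ r ∈ g, GoodRow r) :
    g.map bRoll = g.map (canonWith aRebuildLast) :=
  List.map_congr_left (fun r hr => bRoll_eq_canon (hg r hr))

-- rolling the reversed rows east is reversing the rows rolled west
theorem mL_rho {g : List (List Char)} (hg : ∀ r ∈ g, GoodRow r) :
    (g.map List.reverse).map (canonWith aRebuildLast)
      = (g.map (canonWith aRebuildFirst)).map List.reverse := by
  rw [List.map_map, List.map_map]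
  exact List.map_congr_left (fun r hr => canon_reverse (hg r hr))

theorem aTiltH_eq_F {g : List (List Char)} (hg : ∀ r ∈ g, GoodRow r) :
    aTiltH aRebuildFirst g = g.map (canonWith aRebuildFirst) :=
  List.map_congr_left (fun r hr => aRow_eq_canon (fun s hs hh => rebuild_len_first hs hh) (hg r hr))
theorem aTiltH_eq_L {g : List (List Char)} (hg : ∀ r ∈ g, GoodRow r) :
    aTiltH aRebuildLast g = g.map (canonWith aRebuildLast) :=
  List.map_congr_left (fun r hr => aRow_eq_canon (fun s hs hh => rebuild_len_last hs hh) (hg r hr))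

theorem aTiltV_eq_F {R C : Nat} {g : List (List Char)} (h : GoodGrid R C g) (hR : 0 < R) :
    aTiltV aRebuildFirst g = idxT R ((idxT C g).map (canonWith aRebuildFirst)) := by
  have hcols := idxT_shape h
  rw [aTiltV_eq h hR aRebuildFirst (fun col hcol => by
    rw [aRow_eq_canon (fun s hs hh => rebuild_len_first hs hh) (hcols.2 col hcol).2,
      canonF_len (hcols.2 col hcol).2]
    exact (hcols.2 col hcol).1)]
  congr 1
  exact List.map_congr_left (fun col hcol =>
    aRow_eq_canon (fun s hs hh => rebuild_len_first hs hh) (hcols.2 col hcol).2)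

theorem aTiltV_eq_L {R C : Nat} {g : List (List Char)} (h : GoodGrid R C g) (hR : 0 < R) :
    aTiltV aRebuildLast g = idxT R ((idxT C g).map (canonWith aRebuildLast)) := by
  have hcols := idxT_shape h
  rw [aTiltV_eq h hR aRebuildLast (fun col hcol => by
    rw [aRow_eq_canon (fun s hs hh => rebuild_len_last hs hh) (hcols.2 col hcol).2,
      canonL_len (hcols.2 col hcol).2]
    exact (hcols.2 col hcol).1)]
  congr 1
  exact List.map_congr_left (fun col hcol =>
    aRow_eq_canon (fun s hs hh => rebuild_len_last hs hh) (hcols.2 col hcol).2)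

theorem spin_eq {R C : Nat} {g : List (List Char)} (h : GoodGrid R C g) (hR : 0 < R) (hC : 0 < C) :
    bSpin g = aTiltH aRebuildLast (aTiltV aRebuildLast (aTiltH aRebuildFirst (aTiltV aRebuildFirst g))) := by
  have hg1 : GoodGrid C R (idxT C g) := idxT_shape h
  set X := (idxT C g).map (canonWith aRebuildFirst) with hXdef
  have hX : GoodGrid C R X := gg_mF hg1
  have eA1 : aTiltV aRebuildFirst g = idxT R X := aTiltV_eq_F h hR
  have hA1 : GoodGrid R C (idxT R X) := idxT_shape hX
  set A2 := (idxT R X).map (canonWith aRebuildFirst) with hA2def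
  have hA2 : GoodGrid R C A2 := gg_mF hA1
  have eA2 : aTiltH aRebuildFirst (idxT R X) = A2 := aTiltH_eq_F (fun r hr => (hA1.2 r hr).2)
  set Y := (idxT C A2).map (canonWith aRebuildLast) with hYdef
  have hY : GoodGrid C R Y := gg_mL (idxT_shape hA2)
  have eA3 : aTiltV aRebuildLast A2 = idxT R Y := aTiltV_eq_L hA2 hR
  have hA3 : GoodGrid R C (idxT R Y) := idxT_shape hY
  have eA4 : aTiltH aRebuildLast (idxT R Y) = (idxT R Y).map (canonWith aRebuildLast) :=
    aTiltH_eq_L (fun r hr => (hA3.2 r hr).2)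
  -- B side, step 1
  have e1 : (bRotate g).map bRoll = X.map List.reverse := by
    rw [bRotate_eq h hR, idxT_reverse,
      map_bRoll_eq (fun r hr => ((gg_rho hg1).2 r hr).2),
      mL_rho (fun r hr => (hg1.2 r hr).2)]
  -- step 2
  have e2 : (bRotate (X.map List.reverse)).map bRoll = (A2.map List.reverse).reverse := by
    rw [bRotate_eq (gg_rho hX) hC]
    rw [show (X.map List.reverse).reverse = X.reverse.map List.reverse from List.map_reverse.symm]
    rw [idxT_map_reverse (fun r hr => ((gg_reverse hX).2 r hr).1)]
    rw [idxT_reverse R X]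
    rw [show ((idxT R X).map List.reverse).reverse.map bRoll
          = (((idxT R X).map List.reverse).map bRoll).reverse from List.map_reverse]
    rw [map_bRoll_eq (fun r hr => ((gg_rho hA1).2 r hr).2),
      mL_rho (fun r hr => (hA1.2 r hr).2), ← hA2def]
  -- step 3
  have e3 : (bRotate ((A2.map List.reverse).reverse)).map bRoll = Y.reverse := by
    rw [bRotate_eq (gg_reverse (gg_rho hA2)) hR]
    rw [List.reverse_reverse]
    rw [idxT_map_reverse (fun r hr => (hA2.2 r hr).1)]
    rw [show ((idxT C A2).reverse).map bRoll = ((idxT C A2).map bRoll).reverse from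
      List.map_reverse]
    rw [map_bRoll_eq (fun r hr => ((idxT_shape hA2).2 r hr).2), ← hYdef]
  -- step 4
  have e4 : (bRotate Y.reverse).map bRoll = (idxT R Y).map (canonWith aRebuildLast) := by
    rw [bRotate_eq (gg_reverse hY) hC, List.reverse_reverse]
    exact map_bRoll_eq (fun r hr => ((idxT_shape hY).2 r hr).2)
  rw [bSpin_eq4, e1, e2, e3, e4, eA1, eA2, eA3, eA4]

theorem spin_shape {R C : Nat} {g : List (List Char)} (h : GoodGrid R C g) (hR : 0 < R) (hC : 0 < C) :
    GoodGrid R C (bSpin g) := by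
  have hg1 : GoodGrid C R (idxT C g) := idxT_shape h
  have hX : GoodGrid C R ((idxT C g).map (canonWith aRebuildFirst)) := gg_mF hg1
  have hA1 := idxT_shape hX
  have hA2 := gg_mF hA1
  have hY := gg_mL (idxT_shape hA2)
  have hA3 := idxT_shape hY
  rw [spin_eq h hR hC, aTiltV_eq_F h hR, aTiltH_eq_F (fun r hr => (hA1.2 r hr).2),
    aTiltV_eq_L hA2 hR, aTiltH_eq_L (fun r hr => (hA3.2 r hr).2)]
  exact gg_mL hA3

def tagA : List (List (List Char)) → Int → List ((Bool × List (List Char)) × Int)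
  | [], _ => []
  | h :: t, k => ((false, h), k) :: tagA t (k + 1)

def tagB : List (List (List Char)) → Int → List ((List (List Char)) × Int)
  | [], _ => []
  | h :: t, k => (h, k) :: tagB t (k + 1)

theorem tagA_append (hist : List (List (List Char))) (g : List (List Char)) :
    ∀ k : Int, tagA (hist ++ [g]) k = tagA hist k ++ [((false, g), k + hist.length)] := by
  induction hist with
  | nil => intro k; simp [tagA]
  | cons h t ih =>
    intro k
    simp only [List.cons_append, tagA, ih (k + 1), List.length_cons]
    congr 2
    push_cast
    ring

theorem tagB_append (hist : List (List (List Char))) (g : List (List Char)) :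
    ∀ k : Int, tagB (hist ++ [g]) k = tagB hist k ++ [(g, k + hist.length)] := by
  induction hist with
  | nil => intro k; simp [tagB]
  | cons h t ih =>
    intro k
    simp only [List.cons_append, tagB, ih (k + 1), List.length_cons]
    congr 2
    push_cast
    ring

theorem get_tagAB (hist : List (List (List Char))) (g : List (List Char)) :
    ∀ k : Int, (PySem.Dict.mk (tagA hist k)).get? (false, g)
      = (PySem.Dict.mk (tagB hist k)).get? g := by
  induction hist with
  | nil => intro k; rfl
  | cons h t ih =>
    intro k
    show (PySem.Dict.mk (((false, h), k) :: tagA t (k + 1))).get? (false, g)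
      = (PySem.Dict.mk ((h, k) :: tagB t (k + 1))).get? g
    rw [PySem.Dict.get?_mk_cons, PySem.Dict.get?_mk_cons]
    have : (((false, h) : Bool × List (List Char)) == (false, g)) = (h == g) := by
      by_cases hg : h = g <;> simp [hg]
    rw [this, ih (k + 1)]

theorem get_tag_eq (hist : List (List (List Char))) (k : Int) (g t0 : List (List Char)) :
    (PySem.Dict.mk (((true, t0), (0 : Int)) :: tagA hist k)).get? (false, g)
      = (PySem.Dict.mk (tagB hist k)).get? g := by
  rw [PySem.Dict.get?_mk_cons]
  have h1 : (((true, t0) : Bool × List (List Char)) == (false, g)) = false := by simp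
  rw [h1]
  simp only [Bool.false_eq_true, if_false]
  rw [get_tagAB]

theorem get_tagB_bounds {g : List (List Char)} :
    ∀ (hist : List (List (List Char))) (k v : Int),
    (PySem.Dict.mk (tagB hist k)).get? g = some v → k ≤ v ∧ v < k + hist.length := by
  intro hist
  induction hist with
  | nil => intro k v h; exact absurd h (by simp [tagB, PySem.Dict.get?])
  | cons h t ih =>
    intro k v hv
    rw [show tagB (h :: t) k = (h, k) :: tagB t (k + 1) from rfl,
      PySem.Dict.get?_mk_cons] at hv
    by_cases hg : h = g
    · rw [if_pos (by simp [hg])] at hv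
      obtain rfl : k = v := by simpa using hv
      constructor
      · omega
      · simp only [List.length_cons]; push_cast; omega
    · rw [if_neg (by simp [hg])] at hv
      have := ih (k + 1) v hv
      simp only [List.length_cons]
      push_cast
      omega

theorem find_tagA : ∀ (hist : List (List (List Char))) (k idx : Int),
    k ≤ idx → idx < k + hist.length →
    (tagA hist k).find? (fun kv => kv.2 == idx)
      = some ((false, hist.getD (idx - k).toNat []), idx) := by
  intro hist
  induction hist with
  | nil => intro k idx h1 h2; simp at h2; omega
  | cons h t ih =>
    intro k idx h1 h2
    rw [show tagA (h :: t) k = ((false, h), k) :: tagA t (k + 1) from rfl, List.find?_cons]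
    by_cases hk : k = idx
    · subst hk
      simp
    · have : ((k : Int) == idx) = false := by simp [hk]
      rw [this]
      rw [ih (k + 1) idx (by omega) (by simp at h2 ⊢; push_cast; omega)]
      have : (idx - k).toNat = ((idx - (k + 1)).toNat) + 1 := by omega
      rw [this, List.getD_cons_succ]

theorem loop_eq {R C : Nat} (hR : 0 < R) (hC : 0 < C) (t0 : List (List Char)) :
    ∀ (fuel : Nat) (g : List (List Char)) (hist : List (List (List Char))),
      aTiltH aRebuildLast (aTiltV aRebuildLast (aTiltH aRebuildFirst (aTiltV aRebuildFirst g)))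
        = bSpin g →
      GoodGrid R C (bSpin g) →
      aLoop fuel g (PySem.Dict.mk (((true, t0), (0 : Int)) :: tagA hist 1)) ((hist.length : Int) + 1)
        = bLoop fuel g (PySem.Dict.mk (tagB hist 1)) hist := by
  intro fuel
  induction fuel with
  | zero => intro g hist _ _; rfl
  | succ fuel ih =>
    intro g hist hsp hsh
    simp only [aLoop, bLoop]
    rw [hsp]
    rw [get_tag_eq hist 1 (bSpin g) t0]
    rcases hget : (PySem.Dict.mk (tagB hist 1)).get? (bSpin g) with _ | first
    · -- new state: insert and recurse
      have hcontA : (PySem.Dict.mk (((true, t0), (0 : Int)) :: tagA hist 1)).contains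
          (false, bSpin g) = false := by
        rw [← PySem.Dict.get?_eq_none_iff_contains, get_tag_eq, hget]
      have hcontB : (PySem.Dict.mk (tagB hist 1)).contains (bSpin g) = false := by
        rw [← PySem.Dict.get?_eq_none_iff_contains, hget]
      have hinsA : (PySem.Dict.mk (((true, t0), (0 : Int)) :: tagA hist 1)).insert
            (false, bSpin g) ((hist.length : Int) + 1)
          = PySem.Dict.mk (((true, t0), (0 : Int)) :: tagA (hist ++ [bSpin g]) 1) := by
        apply PySem.Dict.ext
        rw [PySem.Dict.items_insert_of_not_contains _ _ hcontA]
        show (((true, t0), (0 : Int)) :: tagA hist 1) ++ [((false, bSpin g), (hist.length : Int) + 1)]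
          = ((true, t0), (0 : Int)) :: tagA (hist ++ [bSpin g]) 1
        rw [tagA_append hist (bSpin g) 1, List.cons_append]
        congr 3
        ring
      have hinsB : (PySem.Dict.mk (tagB hist 1)).insert (bSpin g) ((hist.length : Int) + 1)
          = PySem.Dict.mk (tagB (hist ++ [bSpin g]) 1) := by
        apply PySem.Dict.ext
        rw [PySem.Dict.items_insert_of_not_contains _ _ hcontB]
        show tagB hist 1 ++ [(bSpin g, (hist.length : Int) + 1)] = tagB (hist ++ [bSpin g]) 1
        rw [tagB_append hist (bSpin g) 1]
        congr 3
        ring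
      rw [hinsA, hinsB]
      have hlen' : ((hist.length : Int) + 1) + 1 = (((hist ++ [bSpin g]).length : Int) + 1) := by
        simp
      rw [hlen']
      exact ih (bSpin g) (hist ++ [bSpin g]) (spin_eq hsh hR hC).symm (spin_shape hsh hR hC)
    · -- repeat found
      dsimp only
      have hb := get_tagB_bounds hist 1 first hget
      have hm : (0 : Int) < (hist.length : Int) + 1 - first := by omega
      have hmod1 := PySem.Int.mod_nonneg (1000000000 - first) hm
      have hmod2 := PySem.Int.mod_lt (1000000000 - first) hm
      set idx := first + PySem.Int.mod (1000000000 - first) ((hist.length : Int) + 1 - first)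
        with hidx
      have hidx1 : 1 ≤ idx := by omega
      have hidx2 : idx ≤ (hist.length : Int) := by omega
      have hn : (idx - 1).toNat < hist.length := by omega
      have hfind : (((true, t0), (0 : Int)) :: tagA hist 1).find? (fun kv => kv.2 == idx)
          = some ((false, hist.getD (idx - 1).toNat []), idx) := by
        rw [List.find?_cons]
        have h0 : (((0 : Int)) == idx) = false := by simp; omega
        simp only [h0]
        rw [find_tagA hist 1 idx hidx1 (by push_cast; omega)]
      have e2 : PySem.List.pyGet? hist (idx - 1) = some hist[(idx - 1).toNat] := by
        have hcast : (idx - 1 : Int) = (((idx - 1).toNat : Nat) : Int) := by omega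
        conv_lhs => rw [hcast]
        rw [PySem.List.pyGet?_natCast]
        exact List.getElem?_eq_getElem hn
      rw [hfind, e2]
      rw [List.getD_eq_getElem hist [] hn]

theorem pre_unpack {lines : List String} (h : Pre_spin_cycle lines) :
    lines ≠ [] ∧ (lines.headD "").toList ≠ [] ∧
    ∀ l ∈ lines, (lines.headD "").toList.length ≤ l.toList.length ∧
      ∀ c ∈ l.toList.take (lines.headD "").toList.length, c = 'O' ∨ c = '.' ∨ c = '#' := by
  unfold Pre_spin_cycle at h
  simp only [Bool.and_eq_true, Bool.not_eq_true', List.isEmpty_eq_false_iff,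
    List.all_eq_true, beq_iff_eq, Bool.or_eq_true, decide_eq_true_eq] at h
  obtain ⟨⟨h1, h2⟩, h3⟩ := h
  exact ⟨h1, h2, fun l hl => ⟨(h3 l hl).1, fun c hc => (or_assoc.1 ((h3 l hl).2 c hc))⟩⟩

theorem getD_take {l : List Char} {C i : Nat} (hi : i < C) :
    (l.take C).getD i ' ' = l.getD i ' ' := by
  rw [List.getD, List.getD, List.getElem?_take]
  simp [hi]

theorem head_take {C : Nat} {g : List (List Char)} (hhead : (g.headD []).length = C) :
    ((g.map (List.take C)).headD []).length = C := by
  rcases g with _ | ⟨r, t⟩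
  · simpa using hhead
  · have hr : r.length = C := by simpa using hhead
    simp [List.length_take, hr]

theorem aCols_trunc {C : Nat} {g : List (List Char)} (hhead : (g.headD []).length = C) :
    aCols g = aCols (g.map (List.take C)) := by
  rw [aCols, aCols, hhead, head_take hhead]
  apply List.map_congr_left
  intro i hi
  rw [List.map_map]
  apply List.map_congr_left
  intro l _
  exact (getD_take (List.mem_range.1 hi)).symm

theorem aTiltV_trunc {C : Nat} {g : List (List Char)} (hhead : (g.headD []).length = C)
    (rb : List Char → List Char) :
    aTiltV rb g = aTiltV rb (g.map (List.take C)) := by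
  rw [aTiltV, aTiltV, aCols_trunc hhead, List.length_map]

theorem bRotate_trunc {C : Nat} {g : List (List Char)} (hhead : (g.headD []).length = C) :
    bRotate g = bRotate (g.map (List.take C)) := by
  rw [bRotate, bRotate, hhead, head_take hhead]
  apply List.map_congr_left
  intro i hi
  rw [← List.map_reverse, List.map_map]
  apply List.map_congr_left
  intro l _
  exact (getD_take (List.mem_range.1 hi)).symm

theorem bSpin_trunc {C : Nat} {g : List (List Char)} (hhead : (g.headD []).length = C) :
    bSpin g = bSpin (g.map (List.take C)) := by
  rw [bSpin_eq4, bSpin_eq4, bRotate_trunc hhead]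

theorem final_spec (lines : List String) (hpre : Pre_spin_cycle lines) :
    spin_cycle lines = spin_cycle_alt lines := by
  obtain ⟨h1, h2, h3⟩ := pre_unpack hpre
  have hR : 0 < lines.length := List.length_pos_iff.2 h1
  have hC : 0 < (lines.headD "").toList.length := List.length_pos_iff.2 h2
  have hhead : ((lines.map String.toList).headD []).length = (lines.headD "").toList.length := by
    rcases lines with _ | ⟨r, t⟩
    · simp
    · simp
  have hg : GoodGrid lines.length (lines.headD "").toList.length
      ((lines.map String.toList).map (List.take (lines.headD "").toList.length)) := by
    refine ⟨by simp, ?_⟩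
    intro r hr
    rw [List.map_map] at hr
    obtain ⟨l, hl, rfl⟩ := List.mem_map.1 hr
    refine ⟨?_, fun c hc => (h3 l hl).2 c hc⟩
    show (List.take (lines.headD "").toList.length l.toList).length = _
    rw [List.length_take]
    exact Nat.min_eq_left (h3 l hl).1
  have hsp : aTiltH aRebuildLast (aTiltV aRebuildLast (aTiltH aRebuildFirst
        (aTiltV aRebuildFirst (lines.map String.toList))))
      = bSpin (lines.map String.toList) := by
    rw [aTiltV_trunc hhead, (spin_eq hg hR hC).symm, ← bSpin_trunc hhead]
  have hsh : GoodGrid lines.length (lines.headD "").toList.length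
      (bSpin (lines.map String.toList)) := by
    rw [bSpin_trunc hhead]
    exact spin_shape hg hR hC
  have e0 : (PySem.Dict.empty.insert ((true, lines.map String.toList)) (0 : Int))
      = PySem.Dict.mk (((true, lines.map String.toList), (0 : Int)) :: tagA [] 1) := rfl
  have e1 : (PySem.Dict.empty : PySem.Dict (List (List Char)) Int)
      = PySem.Dict.mk (tagB [] 1) := rfl
  rw [spin_cycle, spin_cycle_alt, e0, e1]
  have e2 : (1 : Int) = ((([] : List (List (List Char))).length : Int) + 1) := by simp
  rw [e2]
  exact loop_eq hR hC (lines.map String.toList) (pvFuel lines) (lines.map String.toList) [] hsp hsh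

-- ===== VERDICT =====
theorem spin_cycle_spec : Claim_equal_spin_cycle := by
  intro lines _ hpre
  exact final_spec lines hpre
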